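-- pv_equiv track=rewrite | github.com/UserGhost411/Simple-IP-Calculator | Python/ipcalc.py | SubnetAll
-- ===== SOURCE A (Python) =====
-- def BinertoIP(a):
--     total = 0
--     a = a[::-1]
--     for i in range(0, len(a)):
--         if(a[i] == "1"):total += 2**i
--     return total
--
-- def DecimaltoSubnet(a):
--     subnet = []
--     for i in range(4):
--         data = ""
--         for i in range(8):
--             data+='1' if a>0 else '0'
--             a-=1
--         subnet.append(str(BinertoIP(data)))
--     return subnet
--
-- def SubnetAll(a,ip):
--     all = []
--     a = DecimaltoSubnet(a)
--     to = (256-int(a[3]))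
--     ip1to3 = ip.split(".")[0]+"."+ip.split(".")[1]+"."+ip.split(".")[2]+".";
--     for i in range(0,255,to):
--         all.append([ip1to3+str(i) ,ip1to3+str(i+1) , ip1to3+str(i+to-2) ,ip1to3+str(i+to-1)])
--     return all;
-- ===== SOURCE B (Python) =====
-- def SubnetAll(a, ip):
--     parts = ip.split(".")
--     prefix = parts[0] + "." + parts[1] + "." + parts[2] + "."
--     n = min(8, max(0, a - 24))
--     to = 2 ** (8 - n)
--     return [[prefix + str(i), prefix + str(i + 1),
--              prefix + str(i + to - 2), prefix + str(i + to - 1)]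
--             for i in range(0, 255, to)]
-- ===== Notes on version B (the rewrite author's own statement) =====
-- stated objective: simpler
-- what changed: Replaces the 32-step bit-string construction (DecimaltoSubnet building four octet strings via BinertoIP's reverse-and-sum loop) with a closed-form block size to = 2**(8 - clamp(a-24, 0, 8)), and builds the result with a comprehension mapped over the same range.
import Mathlib
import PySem

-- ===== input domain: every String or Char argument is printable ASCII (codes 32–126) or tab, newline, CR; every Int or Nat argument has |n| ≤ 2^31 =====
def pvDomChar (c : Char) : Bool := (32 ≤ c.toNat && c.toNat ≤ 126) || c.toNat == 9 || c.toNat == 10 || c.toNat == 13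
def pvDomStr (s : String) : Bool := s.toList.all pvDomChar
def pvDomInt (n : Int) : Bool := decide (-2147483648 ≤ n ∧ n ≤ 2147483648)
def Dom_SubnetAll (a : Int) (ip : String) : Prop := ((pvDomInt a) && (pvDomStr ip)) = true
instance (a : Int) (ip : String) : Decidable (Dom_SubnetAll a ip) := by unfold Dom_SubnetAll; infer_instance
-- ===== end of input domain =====

-- B replaces A's 32-step bit-string construction of the subnet mask by the closed-form
-- block size to = 2^(8 - clamp(a-24,0,8)) and a map over the same range (objective: simpler).

-- ===== PORT A =====
-- BinertoIP(a): reverse the bit string, sum 2^i over '1' positions.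
def pvBinertoIP (s : List Char) : Int :=
  let r := s.reverse
  (PySem.List.pyRange 0 (r.length : Int) 1).foldl
    (fun t i => if PySem.List.pyGetD r i ' ' = '1' then t + 2 ^ i.toNat else t) 0

-- the inner 'for i in range(8)' loop of DecimaltoSubnet (data, a), kept as A writes it
def pvInner (a : Int) : List Char × Int :=
  (List.range 8).foldl
    (fun (p : List Char × Int) _ => (p.1 ++ [if p.2 > 0 then '1' else '0'], p.2 - 1)) ([], a)

def pvDecimaltoSubnet (a : Int) : List String :=
  ((List.range 4).foldl (fun (st : List String × Int) _ =>
      let inner := pvInner st.2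
      (st.1 ++ [PySem.Int.toStr (pvBinertoIP inner.1)], inner.2)) ([], a)).1

def SubnetAll (a : Int) (ip : String) : List (List String) :=
  let s := pvDecimaltoSubnet a
  -- s always has 4 elements and s[3] is str(n), so the getD defaults are never taken
  let step := 256 - (PySem.Int.ofStr? (PySem.List.pyGetD s 3 "")).getD 0
  let parts := (PySem.Str.split? ip ".").getD []
  -- parts[0..2]: Pre_ guarantees at least 3 pieces (otherwise Python raises IndexError)
  let pre := PySem.List.pyGetD parts 0 "" ++ "." ++ PySem.List.pyGetD parts 1 "" ++ "." ++
             PySem.List.pyGetD parts 2 "" ++ "."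
  (PySem.List.pyRange 0 255 step).foldl (fun acc i =>
    acc ++ [[pre ++ PySem.Int.toStr i, pre ++ PySem.Int.toStr (i+1),
             pre ++ PySem.Int.toStr (i+step-2), pre ++ PySem.Int.toStr (i+step-1)]]) []

-- ===== PORT B =====
def SubnetAll_alt (a : Int) (ip : String) : List (List String) :=
  let parts := (PySem.Str.split? ip ".").getD []
  let pre := PySem.List.pyGetD parts 0 "" ++ "." ++ PySem.List.pyGetD parts 1 "" ++ "." ++
             PySem.List.pyGetD parts 2 "" ++ "."
  let n := min 8 (max 0 (a - 24))
  let step := (2:Int) ^ (8 - n).toNat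
  (PySem.List.pyRange 0 255 step).map (fun i =>
    [pre ++ PySem.Int.toStr i, pre ++ PySem.Int.toStr (i+1),
     pre ++ PySem.Int.toStr (i+step-2), pre ++ PySem.Int.toStr (i+step-1)])

-- ===== PRECONDITION & SPEC =====
-- Pre_ excludes exactly the inputs where A raises IndexError: ip splitting on "." into
-- fewer than 3 pieces (ip.split(".")[2] is out of range).
def Pre_SubnetAll (a : Int) (ip : String) : Prop := 3 ≤ ((PySem.Str.split? ip ".").getD []).length
instance (a : Int) (ip : String) : Decidable (Pre_SubnetAll a ip) := by unfold Pre_SubnetAll; infer_instance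
def pvWitness_SubnetAll : Int × String := (26, "192.168.1.0")

def Spec_SubnetAll (a : Int) (ip : String) (out : List (List String)) : Prop := out = SubnetAll_alt a ip
instance (a : Int) (ip : String) (out : List (List String)) : Decidable (Spec_SubnetAll a ip out) := by unfold Spec_SubnetAll; infer_instance

-- ===== CLAIM (what is proved, stated in full; the proofs are below) =====
def Claim_equal_SubnetAll : Prop := ∀ (a : Int) (ip : String), Dom_SubnetAll a ip → Pre_SubnetAll a ip → Spec_SubnetAll a ip (SubnetAll a ip)

-- ===== LEMMAS AND PROOFS =====

theorem pvInner_snd (a : Int) : (pvInner a).2 = a - 8 := by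
  simp only [pvInner, show List.range 8 = [0,1,2,3,4,5,6,7] from by decide, List.foldl]
  ring

theorem pvDts (a : Int) : pvDecimaltoSubnet a =
    [PySem.Int.toStr (pvBinertoIP (pvInner a).1),
     PySem.Int.toStr (pvBinertoIP (pvInner (a - 8)).1),
     PySem.Int.toStr (pvBinertoIP (pvInner (a - 16)).1),
     PySem.Int.toStr (pvBinertoIP (pvInner (a - 24)).1)] := by
  simp only [pvDecimaltoSubnet, show List.range 4 = [0,1,2,3] from by decide, List.foldl,
    pvInner_snd]
  rw [show a - 8 - 8 = a - 16 from by ring, show a - 16 - 8 = a - 24 from by ring]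
  rfl

theorem pvInner_fst_nonpos (a : Int) (h : a ≤ 0) :
    (pvInner a).1 = ['0','0','0','0','0','0','0','0'] := by
  simp only [pvInner, show List.range 8 = [0,1,2,3,4,5,6,7] from by decide, List.foldl]
  split_ifs <;> first | rfl | omega

theorem pvInner_fst_ge (a : Int) (h : 8 ≤ a) :
    (pvInner a).1 = ['1','1','1','1','1','1','1','1'] := by
  simp only [pvInner, show List.range 8 = [0,1,2,3,4,5,6,7] from by decide, List.foldl]
  split_ifs <;> first | rfl | omega

theorem pvTo_eq (a : Int) :
    256 - (PySem.Int.ofStr? (PySem.List.pyGetD (pvDecimaltoSubnet a) 3 "")).getD 0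
      = (2:Int) ^ (8 - min 8 (max 0 (a - 24))).toNat := by
  rw [pvDts]
  have hget : ∀ x1 x2 x3 x4 : String, PySem.List.pyGetD [x1,x2,x3,x4] (3:Int) "" = x4 := by
    intro x1 x2 x3 x4; rfl
  rw [hget]
  by_cases h : a - 24 ≤ 0
  · rw [pvInner_fst_nonpos _ h, show min 8 (max 0 (a - 24)) = 0 from by omega]
    decide
  · by_cases h8 : 8 ≤ a - 24
    · rw [pvInner_fst_ge _ h8, show min 8 (max 0 (a - 24)) = 8 from by omega]
      decide
    · have h1 : 24 < a := by omega
      have h2 : a < 32 := by omega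
      interval_cases a <;> decide

-- ===== VERDICT (by name: the statement is the Claim_ definition above) =====
theorem SubnetAll_spec : Claim_equal_SubnetAll := by
  intro a ip _ _
  unfold Spec_SubnetAll
  simp only [SubnetAll, SubnetAll_alt, pvTo_eq, PySem.List.foldl_append_singleton_eq_map,
    List.nil_append]
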